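-- pv_equiv track=rewrite | github.com/manhlab/passport-extractor | ner.py | findNameByParce
-- ===== SOURCE A (Python) =====
-- def findNameByParce(line_mas):
--     data = line_mas[0:5]
--     name = ""
--     surname = ""
--     for x in data:
--         if len(x) > len(surname):
--             name = surname
--             surname = x
--             continue
--         if len(x) > len(name):
--             name = x
--     return (name, surname)
-- ===== SOURCE B (Python) =====
-- def findNameByParce(line_mas):
--     top = sorted(line_mas[0:5], key=len, reverse=True)[:2]
--     surname = top[0] if top else ""
--     name = top[1] if len(top) > 1 else ""
--     return (name, surname)
-- ===== Notes on version B (the rewrite author's own statement) =====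
-- stated objective: simpler
-- what changed: B replaces A's incremental top-2 tracking loop with a stable descending sort of the first-five slice by length and taking the top two (stability reproduces A's first-wins tie handling).
import Mathlib
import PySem

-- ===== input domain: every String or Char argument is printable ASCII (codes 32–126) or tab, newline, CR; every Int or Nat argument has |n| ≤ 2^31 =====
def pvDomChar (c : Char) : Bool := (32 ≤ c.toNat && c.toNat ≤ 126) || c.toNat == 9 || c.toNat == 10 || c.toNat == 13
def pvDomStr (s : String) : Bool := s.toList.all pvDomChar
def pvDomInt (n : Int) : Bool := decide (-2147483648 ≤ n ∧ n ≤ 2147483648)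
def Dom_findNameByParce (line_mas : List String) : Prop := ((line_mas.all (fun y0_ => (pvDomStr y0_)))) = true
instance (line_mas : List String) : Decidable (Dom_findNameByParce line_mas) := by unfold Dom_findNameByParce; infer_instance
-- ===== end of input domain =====

-- B computes the two longest of the first five by a stable descending length sort instead of A's incremental top-2 loop; objective: simpler.

-- ===== PORT A =====
-- loop body of A's for-loop (the two strict length comparisons, in A's order)
def pvStep (p : String × String) (x : String) : String × String :=
  if PySem.Str.len x > PySem.Str.len p.2 then (p.2, x)
  else if PySem.Str.len x > PySem.Str.len p.1 then (x, p.2)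
  else p

def findNameByParce (line_mas : List String) : String × String :=
  let data := PySem.List.slice line_mas (some 0) (some 5)
  data.foldl pvStep ("", "")

-- ===== PORT B =====
def findNameByParce_alt (line_mas : List String) : String × String :=
  let top := PySem.List.slice
      (PySem.List.sorted (PySem.List.slice line_mas (some 0) (some 5)) (fun s => PySem.Str.len s) true)
      (some 0) (some 2)
  let surname := match top with | [] => "" | a :: _ => a
  let name := match top with | _ :: b :: _ => b | _ => ""
  (name, surname)

-- ===== PRECONDITION & SPEC =====
def Spec_findNameByParce (line_mas : List String) (out : String × String) : Prop := out = findNameByParce_alt line_mas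
instance (line_mas : List String) (out : String × String) : Decidable (Spec_findNameByParce line_mas out) := by unfold Spec_findNameByParce; infer_instance

-- ===== CLAIM (what is proved, stated in full; the proofs are below) =====
def Claim_equal_findNameByParce : Prop := ∀ (line_mas : List String), Dom_findNameByParce line_mas → Spec_findNameByParce line_mas (findNameByParce line_mas)

-- ===== LEMMAS AND PROOFS =====

-- (name, surname) read off from a descending-sorted list: surname = head, name = second, "" when absent
def pvPad (s : List String) : String × String := (s[1]?.getD "", s[0]?.getD "")

theorem pv_len_zero_eq_empty (x : String) (h : ¬ 0 < x.length) : x = "" :=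
  String.length_eq_zero_iff.mp (by omega)

theorem pvStep_pad (s : List String) (x : String) :
    pvStep (pvPad s) x
      = pvPad (PySem.List.insertBy
          (fun a b => decide (PySem.Str.len b < PySem.Str.len a)) x s) := by
  match s with
  | [] =>
    simp only [pvPad, pvStep, PySem.List.insertBy]
    by_cases h : 0 < x.length
    · simp [h]
    · have hx : x = "" := pv_len_zero_eq_empty x h
      subst hx; simp
  | [a] =>
    simp only [pvPad, pvStep, PySem.List.insertBy]
    by_cases h1 : a.length < x.length
    · simp [h1]
    · by_cases h2 : 0 < x.length
      · simp [h1, h2]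
      · have hx : x = "" := pv_len_zero_eq_empty x h2
        subst hx
        have hni : ¬ ((a.length : Int) < 0) := by omega
        simp [hni]
  | a :: b :: t =>
    simp only [pvPad, pvStep, PySem.List.insertBy]
    by_cases h1 : a.length < x.length
    · simp [h1]
    · by_cases h2 : b.length < x.length
      · simp [h1, h2]
      · simp [h1, h2]

theorem pv_fold_eq_pad_sorted (l : List String) :
    l.foldl pvStep ("", "")
      = pvPad (PySem.List.sorted l (fun s => PySem.Str.len s) true) := by
  induction l using List.reverseRecOn with
  | nil => rfl
  | append_singleton l x ih =>
    rw [PySem.List.sorted_rev_eq_foldl_insertBy] at *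
    rw [List.foldl_append, List.foldl_append, ih]
    simp only [List.foldl]
    exact pvStep_pad _ x

theorem pv_take2_pad (s : List String) :
    (let top := PySem.List.slice s (some 0) (some 2)
     ((match top with | _ :: b :: _ => b | _ => ""),
      (match top with | [] => "" | a :: _ => a))) = pvPad s := by
  match s with
  | [] => rfl
  | [a] => rfl
  | a :: b :: t =>
    show _ = pvPad (a :: b :: t)
    have h2 : PySem.List.slice (a :: b :: t) (some 0) (some 2) = [a, b] := by
      rw [PySem.List.slice_zero_start]
      rw [show ((2 : Int)) = ((2 : Nat) : Int) from rfl, PySem.List.slice_to_natCast]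
      rfl
    rw [h2]; rfl

-- ===== VERDICT (by name: the statement is the Claim_ definition above) =====
theorem findNameByParce_spec : Claim_equal_findNameByParce := by
  intro line_mas _
  unfold Spec_findNameByParce findNameByParce findNameByParce_alt
  simp only []
  rw [pv_fold_eq_pad_sorted]
  exact (pv_take2_pad _).symm
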